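-- pv_equiv track=rewrite | github.com/yskang/AlgorithmPractice | baekjoon/python/wonyoung_want_to_be_with_zoac_forever_16723.py | solution
-- ===== SOURCE A (Python) =====
-- def solution(n: int):
--     s = 0
--     bin_num = bin(n)[2:]
--     sums = [2, 4]
--
--     for i in range(2, len(bin_num)+1):
--         sums.append(sums[i-1]*2 + pow(2, i-1))
--
--     for i in range(1, len(sums)):
--         sums[i] += sums[i-1]
--
--     for i, d in enumerate(reversed(bin_num)):
--         if d == '1':
--             s += sums[i]
--     return s
-- ===== SOURCE B (Python) =====
-- def solution(n: int):
--     # Closed form: the weight of bit i (LSB = 0) is (i + 2) * 2**i, since the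
--     # recurrence r_i = 2*r_{i-1} + 2**(i-1) with r_0=2, r_1=4 prefix-sums to
--     # S_i = (i + 2) * 2**i.  Sum these weights over the set bits of |n|
--     # (the sign char 'b' in bin(n)[2:] never matches '1', so sign is irrelevant).
--     m = abs(n)
--     s = 0
--     i = 0
--     while m:
--         if m & 1:
--             s += (i + 2) << i
--         m >>= 1
--         i += 1
--     return s
-- ===== Notes on version B (the rewrite author's own statement) =====
-- stated objective: alternative
-- what changed: A builds the weight list by a recurrence and an in-place prefix-sum pass over the binary string; B replaces the whole recurrence by the closed-form weight (i+2)*2^i per set bit and sums it over the bits of |n| with shifts, never forming the binary string or any list.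
import Mathlib
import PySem

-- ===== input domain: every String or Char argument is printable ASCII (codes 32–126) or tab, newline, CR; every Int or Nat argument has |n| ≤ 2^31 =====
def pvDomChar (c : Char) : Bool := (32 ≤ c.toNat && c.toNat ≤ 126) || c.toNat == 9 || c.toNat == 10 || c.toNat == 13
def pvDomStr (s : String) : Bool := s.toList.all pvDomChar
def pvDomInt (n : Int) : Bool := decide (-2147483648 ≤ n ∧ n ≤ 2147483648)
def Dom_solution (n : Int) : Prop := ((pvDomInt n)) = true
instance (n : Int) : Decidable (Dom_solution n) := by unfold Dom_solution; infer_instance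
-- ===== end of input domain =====

-- B replaces A's recurrence + prefix-sum passes over the binary string by the
-- closed-form per-bit weight (i+2)*2^i summed over the set bits of |n| (objective: alternative).

-- ===== PORT A =====
-- bin(n)[2:] as a list of characters: hand port (exact: Python's bin gives '-0b…' for n<0,
-- '0b0' for 0, '0b…' otherwise, so [2:] is 'b'+bits, '0', or the bits).
def natBits : Nat → List Char
  | 0 => []
  | (m+1) => natBits ((m+1) / 2) ++ [if (m+1) % 2 == 1 then '1' else '0']
decreasing_by exact Nat.div_lt_self (Nat.succ_pos m) (by omega)

def pyBin (n : Int) : List Char :=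
  if n < 0 then 'b' :: natBits (-n).toNat
  else if n = 0 then ['0']
  else natBits n.toNat

def solution (n : Int) : Int :=
  let s : Int := 0
  let bin_num := pyBin n
  let sums : List Int := [2, 4]
  let sums := (PySem.List.pyRange 2 ((bin_num.length : Int) + 1) 1).foldl
      (fun sums i => sums ++ [PySem.List.pyGetD sums (i-1) 0 * 2 + 2 ^ (i-1).toNat]) sums
  let sums := (PySem.List.pyRange 1 (sums.length : Int) 1).foldl
      (fun sums i => PySem.List.pySetD sums i
        (PySem.List.pyGetD sums i 0 + PySem.List.pyGetD sums (i-1) 0)) sums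
  (PySem.List.enumerate bin_num.reverse 0).foldl
      (fun s (p : Int × Char) => if p.2 = '1' then s + PySem.List.pyGetD sums p.1 0 else s) s

-- ===== PORT B =====
-- B's while loop: state (m, i, s); stops when m = 0
def bloop (m : Nat) (i : Nat) (s : Int) : Int :=
  if m = 0 then s
  else bloop (m / 2) (i + 1) (if m % 2 = 1 then s + ((i : Int) + 2) * 2 ^ i else s)
decreasing_by exact Nat.div_lt_self (by omega) (by omega)

def solution_alt (n : Int) : Int := bloop n.natAbs 0 0

-- ===== PRECONDITION & SPEC =====
def Spec_solution (n : Int) (out : Int) : Prop := out = solution_alt n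
instance (n : Int) (out : Int) : Decidable (Spec_solution n out) := by unfold Spec_solution; infer_instance

-- ===== CLAIM (what is proved, stated in full; the proofs are below) =====
def Claim_equal_solution : Prop := ∀ (n : Int), Dom_solution n → Spec_solution n (solution n)

-- ===== LEMMAS AND PROOFS =====

-- raw term of A's first pass and its running prefix sum
def rawF : Nat → Int
  | 0 => 2
  | 1 => 4
  | (i+2) => rawF (i+1) * 2 + 2 ^ (i+1)

def Sf : Nat → Int
  | 0 => 2
  | (i+1) => Sf i + rawF (i+1)

def mixF (k j : Nat) : Int := if j < k then Sf j else rawF j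

def addSum : List Char → Nat → Int → Int
  | [], _, s => s
  | d :: t, j, s => addSum t (j+1) (if d = '1' then s + Sf j else s)

lemma rawF_ge2 (M : Nat) (h : 2 ≤ M) : rawF M = rawF (M-1) * 2 + 2 ^ (M-1) := by
  obtain ⟨k, rfl⟩ : ∃ k, M = k + 2 := ⟨M - 2, by omega⟩
  simp [rawF]

lemma pyBin_ne_nil (n : Int) : pyBin n ≠ [] := by
  unfold pyBin
  split_ifs with h1 h2
  · simp
  · simp
  · have h3 : 0 < n.toNat := by omega
    obtain ⟨m, hm⟩ : ∃ m, n.toNat = m + 1 := ⟨n.toNat - 1, by omega⟩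
    rw [hm]; simp [natBits]

lemma buildA (M : Nat) (h2 : 2 ≤ M) :
    (PySem.List.pyRange 2 (M : Int) 1).foldl
      (fun sums i => sums ++ [PySem.List.pyGetD sums (i-1) 0 * 2 + 2 ^ (i-1).toNat]) [2, 4]
    = (List.range M).map rawF := by
  induction M, h2 using Nat.le_induction with
  | base =>
    rw [PySem.List.pyRange_one_eq_nil (by norm_num)]
    simp [List.range_succ, rawF]
  | succ M hM ih =>
    have hcast : ((M + 1 : Nat) : Int) = (M : Int) + 1 := by push_cast; ring
    rw [hcast, PySem.List.pyRange_one_succ_right (by exact_mod_cast by omega), List.foldl_append, ih]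
    simp only [List.foldl_cons, List.foldl_nil]
    have hidx : (M : Int) - 1 = ((M - 1 : Nat) : Int) := by omega
    rw [hidx, PySem.List.pyGetD_natCast]
    have hlt : M - 1 < M := by omega
    have hget : ((List.range M).map rawF).getD (M-1) 0 = rawF (M-1) := by
      rw [List.getD_eq_getElem?_getD]
      simp [hlt]
    rw [hget, List.range_succ, List.map_append]
    have hexp : ((M - 1 : Nat) : Int).toNat = M - 1 := by omega
    rw [hexp, ← rawF_ge2 M hM]
    simp

lemma set_mix (M k : Nat) (hk : k < M) :
    ((List.range M).map (mixF k)).set k (Sf k) = (List.range M).map (mixF (k+1)) := by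
  apply List.ext_getElem
  · simp
  · intro i h1 h2
    simp only [List.getElem_set, List.getElem_map, List.getElem_range] at *
    by_cases hik : i = k
    · subst hik; simp [mixF]
    · simp only [mixF]
      have : (i < k) ↔ (i < k + 1) := by omega
      split_ifs with a b <;> first | rfl | omega

lemma prefA (M : Nat) (k : Nat) (h1 : 1 ≤ k) (hk : k ≤ M) :
    (PySem.List.pyRange 1 (k : Int) 1).foldl
      (fun sums i => PySem.List.pySetD sums i
        (PySem.List.pyGetD sums i 0 + PySem.List.pyGetD sums (i-1) 0))
      ((List.range M).map rawF)
    = (List.range M).map (mixF k) := by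
  induction k, h1 using Nat.le_induction with
  | base =>
    rw [PySem.List.pyRange_one_eq_nil (by norm_num)]
    apply List.map_congr_left
    intro j hj
    simp only [mixF]
    split_ifs with h
    · interval_cases j
      simp [Sf, rawF]
    · rfl
  | succ k hk1 ih =>
    have hkM : k ≤ M := by omega
    have hcast : ((k + 1 : Nat) : Int) = (k : Int) + 1 := by push_cast; ring
    rw [hcast, PySem.List.pyRange_one_succ_right (by exact_mod_cast hk1), List.foldl_append,
        ih hkM]
    simp only [List.foldl_cons, List.foldl_nil]
    have hidx : (k : Int) - 1 = ((k - 1 : Nat) : Int) := by omega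
    rw [hidx, PySem.List.pyGetD_natCast, PySem.List.pyGetD_natCast, PySem.List.pySetD_natCast]
    have hklt : k < M := by omega
    have hk1lt : k - 1 < M := by omega
    have hgk : ((List.range M).map (mixF k)).getD k 0 = rawF k := by
      rw [List.getD_eq_getElem?_getD]; simp [hklt, mixF]
    have hgk1 : ((List.range M).map (mixF k)).getD (k-1) 0 = Sf (k-1) := by
      rw [List.getD_eq_getElem?_getD]; simp [hk1lt, mixF]
      intro h; omega
    rw [hgk, hgk1]
    have hSf : rawF k + Sf (k-1) = Sf k := by
      obtain ⟨j, rfl⟩ : ∃ j, k = j + 1 := ⟨k - 1, by omega⟩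
      simp [Sf, add_comm]
    rw [hSf]
    exact set_mix M k hklt

lemma finA (M : Nat) (t : List Char) : ∀ (j : Nat) (s : Int), j + t.length ≤ M →
    (PySem.List.enumerate t (j : Int)).foldl
      (fun s (p : Int × Char) => if p.2 = '1' then s + PySem.List.pyGetD ((List.range M).map Sf) p.1 0 else s) s
    = addSum t j s := by
  induction t with
  | nil => intro j s _; simp [addSum, PySem.List.enumerate_nil]
  | cons d t ih =>
    intro j s hle
    rw [PySem.List.enumerate_cons]
    simp only [List.foldl_cons]
    have hjM : j < M := by simp at hle; omega
    have hget : PySem.List.pyGetD ((List.range M).map Sf) ((j : Int)) 0 = Sf j := by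
      rw [PySem.List.pyGetD_natCast, List.getD_eq_getElem?_getD]; simp [hjM]
    have hcast : (j : Int) + 1 = ((j + 1 : Nat) : Int) := by push_cast; ring
    rw [hget, hcast, ih (j+1) _ (by simp at hle ⊢; omega)]
    rfl

lemma solution_eq_addSum (n : Int) : solution n = addSum (pyBin n).reverse 0 0 := by
  simp only [solution]
  have hL : 1 ≤ (pyBin n).length := List.length_pos_of_ne_nil (pyBin_ne_nil n)
  set L := (pyBin n).length with hLdef
  have hcast : ((L : Int) + 1) = ((L + 1 : Nat) : Int) := by push_cast; ring
  rw [hcast, buildA (L+1) (by omega)]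
  have hlen : (((List.range (L+1)).map rawF).length : Int) = ((L + 1 : Nat) : Int) := by simp
  rw [hlen, prefA (L+1) (L+1) (by omega) (le_refl _)]
  have hmix : (List.range (L+1)).map (mixF (L+1)) = (List.range (L+1)).map Sf := by
    apply List.map_congr_left
    intro j hj
    simp only [List.mem_range] at hj
    simp [mixF, hj]
  rw [hmix]
  have h := finA (L+1) (pyBin n).reverse 0 0 (by simp [hLdef])
  simp only [Nat.cast_zero] at h
  exact h

-- closed form for the prefix sums: Sf j = (j+2) * 2^j
lemma rawF_succ_closed (i : Nat) : rawF (i+1) = ((i : Int) + 4) * 2 ^ i := by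
  induction i with
  | zero => simp [rawF]
  | succ i ih =>
    rw [show i + 1 + 1 = i + 2 from rfl]
    simp only [rawF, ih]
    push_cast
    ring

lemma Sf_closed (j : Nat) : Sf j = ((j : Int) + 2) * 2 ^ j := by
  induction j with
  | zero => simp [Sf]
  | succ j ih =>
    simp only [Sf, ih, rawF_succ_closed]
    push_cast
    ring

-- addSum ignores a trailing non-'1' character
lemma addSum_append_b (xs : List Char) : ∀ (j : Nat) (s : Int),
    addSum (xs ++ ['b']) j s = addSum xs j s := by
  induction xs with
  | nil => intro j s; simp [addSum]
  | cons d t ih => intro j s; simp only [List.cons_append, addSum, ih]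

-- B's loop over m computes exactly addSum over the reversed bits of m
lemma bloop_eq_addSum (m : Nat) : ∀ (j : Nat) (s : Int),
    bloop m j s = addSum (natBits m).reverse j s := by
  induction m using Nat.strong_induction_on with
  | _ m ih =>
    intro j s
    match m with
    | 0 => simp [bloop, natBits, addSum]
    | (k+1) =>
      rw [bloop]
      simp only [Nat.add_eq_zero_iff]
      rw [ih ((k+1)/2) (Nat.div_lt_self (by omega) (by omega))]
      rw [show natBits (k+1) = natBits ((k+1)/2) ++ [if (k+1) % 2 == 1 then '1' else '0'] from by
        rw [natBits]]
      rw [List.reverse_append]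
      simp only [List.reverse_cons, List.reverse_nil, List.nil_append, List.singleton_append,
        addSum]
      rw [Sf_closed]
      by_cases h : (k+1) % 2 = 1
      · simp [h]
      · have : ¬ ((k+1) % 2 == 1) = true := by simpa using h
        simp [h, this]

lemma solution_alt_eq_addSum (n : Int) : solution_alt n = addSum (pyBin n).reverse 0 0 := by
  unfold solution_alt
  rw [bloop_eq_addSum]
  unfold pyBin
  split_ifs with h1 h2
  · rw [List.reverse_cons, addSum_append_b]
    have h : n.natAbs = (-n).toNat := by omega
    rw [h]
  · subst h2; simp [addSum, natBits]
  · have h : n.natAbs = n.toNat := by omega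
    rw [h]

-- ===== VERDICT (by name: the statement is the Claim_ definition above) =====
theorem solution_spec : Claim_equal_solution := by
  intro n _
  unfold Spec_solution
  rw [solution_eq_addSum, solution_alt_eq_addSum]
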